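-- pv_equiv track=rewrite | github.com/sferrada/athenapk_kultrun | src/mdl_files.py | modify_input_file
-- ===== SOURCE A (Python) =====
-- def modify_input_file(config: dict, modifications: list) -> dict:
--     """
--     Modify a configuration dictionary based on a list of specified modifications.
--
--     :param config: dict, the original configuration dictionary to be modified.
--     :param modifications: list, a list of modifications, where each modification is a tuple
--                           (section, key, new_value) specifying the section, key, and the new value to be set.
--     :return: dict, the modified configuration dictionary. """
--     modified_config = config.copy()
--     for section, key, new_value in modifications:
--         if section in modified_config:
--             for i, (config_key, value, comment) in enumerate(modified_config[section]):
--                 if config_key == key: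
--                     modified_config[section][i] = (key, new_value, comment)
--     return modified_config
-- ===== SOURCE B (Python) =====
-- def modify_input_file(config: dict, modifications: list) -> dict:
--     # Build a per-section map of key -> last new_value, then sweep each config
--     # section once, rewriting matching entries in place (preserves aliasing).
--     mods_by_section = {}
--     for section, key, new_value in modifications:
--         mods_by_section.setdefault(section, {})[key] = new_value
--     modified_config = config.copy()
--     for section, entries in modified_config.items():
--         modmap = mods_by_section.get(section)
--         if modmap is None:
--             continue
--         for i, (config_key, value, comment) in enumerate(entries):
--             if config_key in modmap:
--                 entries[i] = (config_key, modmap[config_key], comment)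
--     return modified_config
-- ===== Notes on version B (the rewrite author's own statement) =====
-- stated objective: alternative
-- what changed: B first groups all modifications into a per-section key->last-value dict, then sweeps each config section once, instead of rescanning the section list for every modification.
import Mathlib
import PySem

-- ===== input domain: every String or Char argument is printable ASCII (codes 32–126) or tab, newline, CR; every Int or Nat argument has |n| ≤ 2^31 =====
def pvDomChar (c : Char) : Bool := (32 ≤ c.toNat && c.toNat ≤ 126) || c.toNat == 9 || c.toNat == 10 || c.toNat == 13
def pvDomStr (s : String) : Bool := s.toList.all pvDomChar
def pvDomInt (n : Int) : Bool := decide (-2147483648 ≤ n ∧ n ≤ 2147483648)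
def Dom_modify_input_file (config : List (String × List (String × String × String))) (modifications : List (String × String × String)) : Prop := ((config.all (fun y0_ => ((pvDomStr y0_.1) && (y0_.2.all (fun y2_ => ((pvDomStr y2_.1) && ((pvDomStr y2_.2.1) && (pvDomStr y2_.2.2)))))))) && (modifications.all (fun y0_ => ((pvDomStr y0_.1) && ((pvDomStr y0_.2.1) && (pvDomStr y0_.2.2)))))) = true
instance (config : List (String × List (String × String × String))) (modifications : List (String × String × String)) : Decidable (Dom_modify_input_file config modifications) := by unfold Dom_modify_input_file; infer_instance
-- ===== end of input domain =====

-- ===== PORT A =====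
-- inner loop of A: 'for i, (config_key, value, comment) in enumerate(...): if config_key == key: lst[i] = (key, new_value, comment)'
def pvSetMatching (key nv : String) : List (String × String × String) → List (String × String × String)
  | [] => []
  | e :: rest => (if e.1 == key then (key, nv, e.2.2) else e) :: pvSetMatching key nv rest

-- 'modified_config[section] = <edited list>': dict semantics on the association list = first matching section
def pvDictSetFirst (sec : String) (f : List (String × String × String) → List (String × String × String)) :
    List (String × List (String × String × String)) → List (String × List (String × String × String))
  | [] => []
  | p :: rest => if p.1 == sec then (p.1, f p.2) :: rest else p :: pvDictSetFirst sec f rest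

-- loop body of A over one modification (section, key, new_value)
def pvStepA (mc : List (String × List (String × String × String))) (m : String × String × String) :
    List (String × List (String × String × String)) :=
  if mc.any (fun p => p.1 == m.1) then pvDictSetFirst m.1 (pvSetMatching m.2.1 m.2.2) mc else mc

def modify_input_file (config : List (String × List (String × String × String))) (modifications : List (String × String × String)) : List (String × List (String × String × String)) :=
  modifications.foldl pvStepA config

-- ===== PORT B =====
-- 'mods_by_section.setdefault(section, {})[key] = new_value' over all modifications
def pvBuildStep (d : PySem.Dict String (PySem.Dict String String)) (m : String × String × String) :
    PySem.Dict String (PySem.Dict String String) :=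
  d.insert m.1 ((d.getD m.1 PySem.Dict.empty).insert m.2.1 m.2.2)

-- inner sweep of B: replace the value of every entry whose key is in modmap
def pvApplySec (modmap : PySem.Dict String String) (entries : List (String × String × String)) :
    List (String × String × String) :=
  entries.map (fun e => match modmap.get? e.1 with
    | some nv => (e.1, nv, e.2.2)
    | none => e)

def modify_input_file_alt (config : List (String × List (String × String × String))) (modifications : List (String × String × String)) : List (String × List (String × String × String)) :=
  let modsBySection := modifications.foldl pvBuildStep PySem.Dict.empty
  config.map (fun p => match modsBySection.get? p.1 with
    | some modmap => (p.1, pvApplySec modmap p.2)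
    | none => p)

-- ===== PRECONDITION & SPEC =====
-- Pre_ excludes association lists whose section names repeat: such a value cannot arise from the
-- Python dict argument (dict keys are unique), so nothing of A's actual domain is excluded.
def Pre_modify_input_file (config : List (String × List (String × String × String))) (modifications : List (String × String × String)) : Prop :=
  (config.map Prod.fst).Nodup
instance (config : List (String × List (String × String × String))) (modifications : List (String × String × String)) : Decidable (Pre_modify_input_file config modifications) := by unfold Pre_modify_input_file; infer_instance
def pvWitness_modify_input_file : (List (String × List (String × String × String))) × (List (String × String × String)) :=
  ([("hydro", [("cfl", "0.3", "c")]), ("mesh", [("nx1", "64", "")])], [("hydro", "cfl", "0.4"), ("mesh", "nx1", "128")])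
def Spec_modify_input_file (config : List (String × List (String × String × String))) (modifications : List (String × String × String)) (out : List (String × List (String × String × String))) : Prop := out = modify_input_file_alt config modifications
instance (config : List (String × List (String × String × String))) (modifications : List (String × String × String)) (out : List (String × List (String × String × String))) : Decidable (Spec_modify_input_file config modifications out) := by unfold Spec_modify_input_file; infer_instance

-- ===== CLAIM (what is proved, stated in full; the proofs are below) =====
def Claim_equal_modify_input_file : Prop := ∀ (config : List (String × List (String × String × String))) (modifications : List (String × String × String)), Dom_modify_input_file config modifications → Pre_modify_input_file config modifications → Spec_modify_input_file config modifications (modify_input_file config modifications)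

-- ===== LEMMAS AND PROOFS =====

-- proof-side view of B: apply a fixed mods-by-section dict M to the config
def pvApplyM (M : PySem.Dict String (PySem.Dict String String))
    (config : List (String × List (String × String × String))) :
    List (String × List (String × String × String)) :=
  config.map (fun p => match M.get? p.1 with
    | some modmap => (p.1, pvApplySec modmap p.2)
    | none => p)

theorem pvApplyM_eq_alt (config : List (String × List (String × String × String)))
    (modifications : List (String × String × String)) :
    modify_input_file_alt config modifications
      = pvApplyM (modifications.foldl pvBuildStep PySem.Dict.empty) config := rfl

theorem pvApplySec_empty (es : List (String × String × String)) :
    pvApplySec PySem.Dict.empty es = es := by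
  simp [pvApplySec, PySem.Dict.get?_empty]

theorem pvApplySec_insert (d : PySem.Dict String String) (k v : String)
    (es : List (String × String × String)) :
    pvApplySec (d.insert k v) es = pvSetMatching k v (pvApplySec d es) := by
  induction es with
  | nil => rfl
  | cons e rest ih =>
    have step1 : pvApplySec (d.insert k v) (e :: rest)
        = (match (d.insert k v).get? e.1 with | some nv => (e.1, nv, e.2.2) | none => e)
            :: pvApplySec (d.insert k v) rest := rfl
    have step2 : pvApplySec d (e :: rest)
        = (match d.get? e.1 with | some nv => (e.1, nv, e.2.2) | none => e)
            :: pvApplySec d rest := rfl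
    rw [step1, step2, ih, pvSetMatching]
    congr 1
    by_cases h : e.1 = k <;> cases hd : d.get? e.1 <;>
      simp [PySem.Dict.get?_insert, h, hd]

theorem pvDictSetFirst_of_no_match (s : String) (f : List (String × String × String) → List (String × String × String))
    (mc : List (String × List (String × String × String)))
    (h : mc.any (fun p => p.1 == s) = false) :
    pvDictSetFirst s f mc = mc := by
  induction mc with
  | nil => rfl
  | cons p rest ih =>
    simp only [List.any_cons, Bool.or_eq_false_iff] at h
    simp [pvDictSetFirst, h.1, ih h.2]

theorem pvStepA_eq (mc : List (String × List (String × String × String))) (m : String × String × String) :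
    pvStepA mc m = pvDictSetFirst m.1 (pvSetMatching m.2.1 m.2.2) mc := by
  unfold pvStepA
  by_cases h : mc.any (fun p => p.1 == m.1) = true
  · simp [h]
  · simp only [Bool.not_eq_true] at h
    simp [h, pvDictSetFirst_of_no_match _ _ _ h]

theorem pvApplyM_insert_of_not_mem (M : PySem.Dict String (PySem.Dict String String))
    (s : String) (d : PySem.Dict String String)
    (config : List (String × List (String × String × String)))
    (h : ∀ p ∈ config, p.1 ≠ s) :
    pvApplyM (M.insert s d) config = pvApplyM M config := by
  unfold pvApplyM
  refine List.map_congr_left (fun p hp => ?_)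
  rw [PySem.Dict.get?_insert_of_ne M d (h p hp)]

-- one modification step commutes with applying the accumulated dict
theorem pvApplyM_buildStep (M : PySem.Dict String (PySem.Dict String String))
    (m : String × String × String)
    (config : List (String × List (String × String × String)))
    (hnd : (config.map Prod.fst).Nodup) :
    pvApplyM (pvBuildStep M m) config
      = pvDictSetFirst m.1 (pvSetMatching m.2.1 m.2.2) (pvApplyM M config) := by
  obtain ⟨s, k, v⟩ := m
  induction config with
  | nil => rfl
  | cons p rest ih =>
    obtain ⟨p1, p2⟩ := p
    simp only [List.map_cons, List.nodup_cons, List.mem_map] at hnd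
    by_cases h : p1 = s
    · subst h
      have hrest : ∀ q ∈ rest, q.1 ≠ p1 := by
        intro q hq he
        exact hnd.1 ⟨q, hq, he⟩
      have htail : pvApplyM (pvBuildStep M (p1, k, v)) rest = pvApplyM M rest := by
        unfold pvBuildStep
        exact pvApplyM_insert_of_not_mem _ _ _ _ hrest
      have hhead :
          (match (pvBuildStep M (p1, k, v)).get? p1 with
            | some modmap => (p1, pvApplySec modmap p2)
            | none => (p1, p2))
            = (p1, pvSetMatching k v (pvApplySec (M.getD p1 PySem.Dict.empty) p2)) := by
        unfold pvBuildStep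
        rw [PySem.Dict.get?_insert_self, ← pvApplySec_insert]
      show (match (pvBuildStep M (p1, k, v)).get? p1 with
            | some modmap => (p1, pvApplySec modmap p2)
            | none => (p1, p2)) :: pvApplyM (pvBuildStep M (p1, k, v)) rest
          = pvDictSetFirst p1 (pvSetMatching k v)
              ((match M.get? p1 with
                | some modmap => (p1, pvApplySec modmap p2)
                | none => (p1, p2)) :: pvApplyM M rest)
      rw [hhead, htail]
      cases hM : M.get? p1 with
      | none =>
        simp [pvDictSetFirst, PySem.Dict.getD_eq_get?_getD, hM, pvApplySec_empty]
      | some mm =>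
        simp [pvDictSetFirst, PySem.Dict.getD_eq_get?_getD, hM]
    · have hhead :
          (match (pvBuildStep M (s, k, v)).get? p1 with
            | some modmap => (p1, pvApplySec modmap p2)
            | none => (p1, p2))
            = (match M.get? p1 with
                | some modmap => (p1, pvApplySec modmap p2)
                | none => (p1, p2)) := by
        unfold pvBuildStep
        rw [PySem.Dict.get?_insert_of_ne M _ h]
      show (match (pvBuildStep M (s, k, v)).get? p1 with
            | some modmap => (p1, pvApplySec modmap p2)
            | none => (p1, p2)) :: pvApplyM (pvBuildStep M (s, k, v)) rest
          = pvDictSetFirst s (pvSetMatching k v)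
              ((match M.get? p1 with
                | some modmap => (p1, pvApplySec modmap p2)
                | none => (p1, p2)) :: pvApplyM M rest)
      rw [hhead, ih hnd.2]
      cases M.get? p1 <;> simp [pvDictSetFirst, h]

theorem pvApplyM_foldl (modifications : List (String × String × String))
    (M : PySem.Dict String (PySem.Dict String String))
    (config : List (String × List (String × String × String)))
    (hnd : (config.map Prod.fst).Nodup) :
    pvApplyM (modifications.foldl pvBuildStep M) config
      = modifications.foldl pvStepA (pvApplyM M config) := by
  induction modifications generalizing M with
  | nil => rfl
  | cons m rest ih =>
    simp only [List.foldl_cons]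
    rw [ih (pvBuildStep M m), pvApplyM_buildStep M m config hnd, ← pvStepA_eq]

theorem pvApplyM_empty (config : List (String × List (String × String × String))) :
    pvApplyM PySem.Dict.empty config = config := by
  simp [pvApplyM, PySem.Dict.get?_empty]

-- ===== VERDICT (by name: the statement is the Claim_ definition above) =====
theorem modify_input_file_spec : Claim_equal_modify_input_file := by
  intro config modifications _ hpre
  unfold Spec_modify_input_file
  rw [pvApplyM_eq_alt, pvApplyM_foldl _ _ _ hpre, pvApplyM_empty]
  rfl
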